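-- pv_equiv track=rewrite | github.com/soyoung97/AcuRank | tourrank.py | get_groups_skip
-- ===== SOURCE A (Python) =====
-- def get_groups_skip(docs_id, to_n_groups=10, m_docs_per_group=10):
--
--     # doc_num = len(docs_id)
--     docs_groups = []
--     for i in range(to_n_groups):
--         cur_group = []
--         for j in range(m_docs_per_group):
--             idx = j * to_n_groups + i
--             if idx < len(docs_id):
--                 cur_group.append(docs_id[idx])
--             #cur_group.append(docs_id[j*to_n_groups + i])
--         docs_groups.append(cur_group)
--
--     return docs_groups
-- ===== SOURCE B (Python) =====
-- def get_groups_skip(docs_id, to_n_groups=10, m_docs_per_group=10):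
--     if to_n_groups <= 0:
--         return []
--     groups = [[] for _ in range(to_n_groups)]
--     for idx, doc in enumerate(docs_id):
--         if idx // to_n_groups < m_docs_per_group:
--             groups[idx % to_n_groups].append(doc)
--     return groups
-- ===== Notes on version B (the rewrite author's own statement) =====
-- stated objective: faster
-- what changed: Replaces the group-major nested loops (for each group, scan j in range(m_docs_per_group) computing j*G+i) with a single flat routing pass over enumerate(docs_id) that sends each doc to groups[idx % G] when idx // G < m_docs_per_group.
import Mathlib
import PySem

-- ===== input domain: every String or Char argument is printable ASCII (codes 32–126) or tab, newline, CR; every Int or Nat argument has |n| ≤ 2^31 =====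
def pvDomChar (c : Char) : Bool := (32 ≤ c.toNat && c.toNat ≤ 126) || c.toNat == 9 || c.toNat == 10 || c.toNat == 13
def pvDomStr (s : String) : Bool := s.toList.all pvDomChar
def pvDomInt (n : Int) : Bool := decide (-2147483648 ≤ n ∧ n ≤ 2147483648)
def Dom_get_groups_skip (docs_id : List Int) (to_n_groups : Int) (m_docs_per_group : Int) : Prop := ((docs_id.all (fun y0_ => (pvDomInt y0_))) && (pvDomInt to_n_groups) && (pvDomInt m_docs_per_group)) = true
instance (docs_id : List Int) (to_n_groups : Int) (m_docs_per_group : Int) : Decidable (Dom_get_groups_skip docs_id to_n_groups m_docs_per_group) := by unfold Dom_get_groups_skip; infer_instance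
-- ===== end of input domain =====

-- B replaces A's group-major nested loops (which iterate all to_n_groups*m_docs_per_group index
-- slots) with a single flat routing pass over enumerate(docs_id) that appends each doc to
-- groups[idx % G] when idx // G < m — O(G + n) instead of O(G*m).

-- ===== PORT A =====
-- docs_id[idx] is guarded by 'idx < len(docs_id)' and idx = j*G+i ≥ 0, so it never raises;
-- ported as pyGetD (default unreachable).
def get_groups_skip (docs_id : List Int) (to_n_groups : Int) (m_docs_per_group : Int) : List (List Int) :=
  (PySem.List.pyRange 0 to_n_groups 1).foldl
    (fun docs_groups i =>
      docs_groups ++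
        [(PySem.List.pyRange 0 m_docs_per_group 1).foldl
          (fun cur_group j =>
            let idx := j * to_n_groups + i
            if idx < (docs_id.length : Int) then cur_group ++ [PySem.List.pyGetD docs_id idx 0]
            else cur_group)
          []])
    []

-- ===== PORT B =====
def get_groups_skip_alt (docs_id : List Int) (to_n_groups : Int) (m_docs_per_group : Int) : List (List Int) :=
  if to_n_groups ≤ 0 then []
  else
    (PySem.List.enumerate docs_id 0).foldl
      (fun groups p =>
        if PySem.Int.floordiv p.1 to_n_groups < m_docs_per_group then
          PySem.List.pySetD groups (PySem.Int.mod p.1 to_n_groups)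
            (PySem.List.pyGetD groups (PySem.Int.mod p.1 to_n_groups) [] ++ [p.2])
        else groups)
      (List.replicate to_n_groups.toNat [])

-- ===== PRECONDITION & SPEC =====
def Spec_get_groups_skip (docs_id : List Int) (to_n_groups : Int) (m_docs_per_group : Int) (out : List (List Int)) : Prop := out = get_groups_skip_alt docs_id to_n_groups m_docs_per_group
instance (docs_id : List Int) (to_n_groups : Int) (m_docs_per_group : Int) (out : List (List Int)) : Decidable (Spec_get_groups_skip docs_id to_n_groups m_docs_per_group out) := by unfold Spec_get_groups_skip; infer_instance

-- ===== CLAIM (what is proved, stated in full; the proofs are below) =====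
def Claim_equal_get_groups_skip : Prop := ∀ (docs_id : List Int) (to_n_groups : Int) (m_docs_per_group : Int), Dom_get_groups_skip docs_id to_n_groups m_docs_per_group → Spec_get_groups_skip docs_id to_n_groups m_docs_per_group (get_groups_skip docs_id to_n_groups m_docs_per_group)

-- ===== LEMMAS AND PROOFS =====

-- The docs routed to group i by B's pass, starting at index s (Nat view of the fold).
def pvSel (docs : List Int) (g i : Nat) (m : Int) (s : Nat) : List Int :=
  match docs with
  | [] => []
  | d :: ds => (if s % g = i ∧ ((s / g : Nat) : Int) < m then [d] else []) ++ pvSel ds g i m (s + 1)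

theorem pvSel_eq_filter (docs : List Int) (g i : Nat) (m : Int) (s : Nat) :
    pvSel docs g i m s =
      ((List.range docs.length).filter
        (fun t => decide ((s + t) % g = i ∧ (((s + t) / g : Nat) : Int) < m))).map
        (fun t => docs.getD t 0) := by
  induction docs generalizing s with
  | nil => simp [pvSel]
  | cons d ds ih =>
    have hidx : ∀ t : Nat, s + 1 + t = s + (t + 1) := fun t => by omega
    simp only [pvSel, ih (s + 1), List.length_cons, List.range_succ_eq_map, List.filter_cons,
      List.filter_map]
    by_cases h : s % g = i ∧ ((s : Int) / (g : Int)) < m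
    · obtain ⟨h1, h2⟩ := h
      simp [h1, h2, Function.comp_def, hidx]
    · simp [h, Function.comp_def, hidx]

-- Two strictly increasing index lists with the same membership are equal:
-- the indices t < n with t % g = i and t / g < M are exactly j*g+i for j < M with j*g+i < n.
theorem pv_key (n g i M : Nat) (hi : i < g) :
    (List.range n).filter (fun t => decide (t % g = i ∧ t / g < M))
      = ((List.range M).filter (fun j => decide (j * g + i < n))).map (fun j => j * g + i) := by
  have hg : 0 < g := by omega
  have s1 : ((List.range n).filter (fun t => decide (t % g = i ∧ t / g < M))).Pairwise (· < ·) :=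
    (List.pairwise_lt_range).filter _
  have s2 : (((List.range M).filter (fun j => decide (j * g + i < n))).map
      (fun j => j * g + i)).Pairwise (· < ·) := by
    refine List.Pairwise.map _ (fun a b h => ?_) ((List.pairwise_lt_range).filter _)
    nlinarith [hg, h]
  have hperm := (List.perm_ext_iff_of_nodup (s1.imp fun h => Nat.ne_of_lt h)
      (s2.imp fun h => Nat.ne_of_lt h)).mpr ?_
  · exact List.Perm.eq_of_pairwise (fun a b _ _ h1 h2 => absurd h1 (by omega)) s1 s2 hperm
  intro t
  simp only [List.mem_filter, List.mem_range, List.mem_map, decide_eq_true_eq]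
  constructor
  · rintro ⟨htn, hmod, hdiv⟩
    have hdm := Nat.div_add_mod t g
    have hcomm : t / g * g = g * (t / g) := Nat.mul_comm _ _
    refine ⟨t / g, ⟨hdiv, ?_⟩, ?_⟩ <;> omega
  · rintro ⟨j, ⟨hjM, hjn⟩, rfl⟩
    have h1 : (j * g + i) % g = i := by
      rw [Nat.add_comm, Nat.add_mul_mod_self_right, Nat.mod_eq_of_lt hi]
    have h2 : (j * g + i) / g = j := by
      rw [Nat.add_comm, Nat.add_mul_div_right _ _ hg, Nat.div_eq_of_lt hi]
      omega
    exact ⟨hjn, h1, by omega⟩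

-- Invariant of B's routing fold: each group i accumulates exactly pvSel.
theorem pv_foldB (docs : List Int) (g : Nat) (m : Int) (_hg : 0 < g) (s : Nat)
    (groups : List (List Int)) (hlen : groups.length = g) :
    (PySem.List.enumerate docs (s : Int)).foldl
      (fun groups p =>
        if PySem.Int.floordiv p.1 (g : Int) < m then
          PySem.List.pySetD groups (PySem.Int.mod p.1 (g : Int))
            (PySem.List.pyGetD groups (PySem.Int.mod p.1 (g : Int)) [] ++ [p.2])
        else groups) groups
    = (List.range g).map (fun i => groups.getD i [] ++ pvSel docs g i m s) := by
  induction docs generalizing s groups with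
  | nil =>
    simp only [PySem.List.enumerate_nil, List.foldl_nil, pvSel, List.append_nil]
    apply List.ext_getElem (by simp [hlen])
    intro k h1 h2
    simp only [List.getElem_map, List.getElem_range]
    rw [List.getD_eq_getElem groups [] (by simp at h2; omega)]
  | cons d ds ih =>
    rw [PySem.List.enumerate_cons]
    have hcast : (s : Int) + 1 = ((s + 1 : Nat) : Int) := by push_cast; ring
    rw [hcast]
    simp only [List.foldl_cons, PySem.Int.floordiv_natCast, PySem.Int.mod_natCast,
      PySem.List.pySetD_natCast, PySem.List.pyGetD_natCast]
    by_cases hc : ((s / g : Nat) : Int) < m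
    · rw [if_pos hc,
        ih (s + 1) (groups.set (s % g) (groups.getD (s % g) [] ++ [d])) (by simp [hlen])]
      apply List.map_congr_left
      intro i hi
      rw [List.mem_range] at hi
      generalize hv : groups.getD (s % g) [] ++ [d] = v
      rw [List.getD_eq_getElem (groups.set (s % g) v) [] (by simp [hlen]; omega),
        List.getD_eq_getElem groups [] (by omega)]
      simp only [List.getElem_set]
      by_cases hieq : s % g = i
      · rw [if_pos hieq, ← hv, hieq, List.getD_eq_getElem groups [] (by omega)]
        have hc' : ((s : Int) / (g : Int)) < m := by rwa [Int.natCast_div] at hc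
        simp [pvSel, hieq, hc']
      · rw [if_neg hieq]
        simp [pvSel, hieq]
    · rw [if_neg hc, ih (s + 1) groups hlen]
      apply List.map_congr_left
      intro i hi
      simp only [pvSel]
      rw [if_neg (by tauto)]
      simp

-- ===== VERDICT (by name: the statement is the Claim_ definition above) =====
theorem get_groups_skip_spec : Claim_equal_get_groups_skip := by
  intro docs G m _
  unfold Spec_get_groups_skip get_groups_skip get_groups_skip_alt
  by_cases hG : G ≤ 0
  · rw [if_pos hG, PySem.List.pyRange_one_eq_nil (a := 0) (b := G) (by omega), List.foldl_nil]
  · rw [if_neg hG]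
    have hGpos : 0 < G := by omega
    obtain ⟨g, hg⟩ : ∃ g : Nat, (g : Int) = G := ⟨G.toNat, Int.toNat_of_nonneg (by omega)⟩
    have hg0 : 0 < g := by omega
    -- B side: the routing fold is pvSel groupwise
    have hfold := pv_foldB docs g m hg0 0 (List.replicate g []) (by simp)
    rw [Nat.cast_zero] at hfold
    rw [← hg]
    simp only [Int.toNat_natCast]
    rw [hfold]
    -- A side: outer loop is a map, inner loop is a filter+map
    rw [PySem.List.foldl_append_singleton_eq_map, List.nil_append]
    rw [PySem.List.pyRange_one 0 (g : Int)]
    simp only [Int.sub_zero, Int.toNat_natCast, List.map_map]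
    apply List.map_congr_left
    intro i hi
    rw [List.mem_range] at hi
    simp only [Function.comp_def, Int.zero_add]
    -- B's group i
    rw [List.getD_eq_getElem (List.replicate g ([] : List Int)) [] (by simp; omega)]
    simp only [List.getElem_replicate, List.nil_append]
    have hB : pvSel docs g i m 0
        = ((List.range m.toNat).filter (fun j => decide (j * g + i < docs.length))).map
            (fun j => docs.getD (j * g + i) 0) := by
      rw [pvSel_eq_filter docs g i m 0]
      simp only [Nat.zero_add]
      rw [List.filter_congr (l := List.range docs.length)
        (q := fun t => decide (t % g = i ∧ t / g < m.toNat))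
        (fun t _ => decide_eq_decide.mpr
          ⟨fun ⟨h1, h2⟩ => ⟨h1, Int.lt_toNat.mpr h2⟩, fun ⟨h1, h2⟩ => ⟨h1, Int.lt_toNat.mp h2⟩⟩)]
      rw [pv_key docs.length g i m.toNat hi, List.map_map]
      simp [Function.comp_def]
    rw [hB]
    -- A's group i
    rw [PySem.List.foldl_append_ite, List.nil_append]
    rw [PySem.List.pyRange_one 0 m]
    simp only [Int.sub_zero, List.filter_map, List.map_map, Function.comp_def, Int.zero_add]
    rw [List.filter_congr (l := List.range m.toNat)
      (q := fun j => decide (j * g + i < docs.length))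
      (fun k _ => decide_eq_decide.mpr (by constructor <;> intro h <;> exact_mod_cast h))]
    apply List.map_congr_left
    intro j hj
    have hidx : ((j : Int) * (g : Int) + (i : Int)) = ((j * g + i : Nat) : Int) := by
      push_cast; ring
    rw [hidx, PySem.List.pyGetD_natCast]
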